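-- pv_equiv track=rewrite | github.com/3OeN0pX/problem-solving | 프로그래머스/0/181833. 특별한 이차원 배열 1/특별한 이차원 배열 1.py | solution
-- ===== SOURCE A (Python) =====
-- def solution(n):
--     answer = []
--
--     for i in range(n):
--         sub_answer = []
--         for j in range(n):
--             if i == j:
--                 sub_answer.append(1)
--             else:
--                 sub_answer.append(0)
--         answer.append(sub_answer)
--
--     return answer
-- ===== SOURCE B (Python) =====
-- def solution(n):
--     # Sliding-window construction: one shared buffer with a single 1 in the
--     # middle; row i is the length-n window of it ending at position 2n-1-i.
--     base = [0] * (n - 1) + [1] + [0] * (n - 1)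
--     return [base[n - 1 - i : 2 * n - 1 - i] for i in range(n)]
-- ===== Notes on version B (the rewrite author's own statement) =====
-- stated objective: alternative
-- what changed: Replaces A's nested index loops with a per-cell i==j test by a sliding-window construction: one shared buffer [0]*(n-1)+[1]+[0]*(n-1) is built once and each row is a length-n slice of it, the window sliding left one step per row.
import Mathlib
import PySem

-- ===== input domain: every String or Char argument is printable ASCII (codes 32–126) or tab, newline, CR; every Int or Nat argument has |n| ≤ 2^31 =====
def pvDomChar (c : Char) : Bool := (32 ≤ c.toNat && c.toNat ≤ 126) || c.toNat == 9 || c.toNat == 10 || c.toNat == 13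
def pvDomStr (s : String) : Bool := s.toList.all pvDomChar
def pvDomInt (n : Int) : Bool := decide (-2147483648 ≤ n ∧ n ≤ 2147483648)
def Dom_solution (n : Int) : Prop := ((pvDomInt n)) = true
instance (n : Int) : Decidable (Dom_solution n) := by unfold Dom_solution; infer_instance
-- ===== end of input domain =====

-- B builds one shared buffer [0]*(n-1)+[1]+[0]*(n-1) and takes each row as a sliding
-- length-n slice of it, instead of A's nested index loops with a per-cell i==j test
-- (objective: alternative).

-- ===== PORT A =====
def solution (n : Int) : List (List Int) :=
  (PySem.List.pyRange 0 n 1).foldl (fun answer i =>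
    answer ++ [(PySem.List.pyRange 0 n 1).foldl
      (fun sub_answer j => sub_answer ++ [if i = j then (1 : Int) else 0]) []]) []

-- ===== PORT B =====
-- '[0]*(n-1)' → List.replicate (n-1).toNat 0 (exact: Python yields [] for n ≤ 1);
-- 'base[a:b]' → PySem.List.slice.
def solution_alt (n : Int) : List (List Int) :=
  let base := List.replicate (n - 1).toNat (0 : Int) ++ [1] ++ List.replicate (n - 1).toNat 0
  (PySem.List.pyRange 0 n 1).map (fun i =>
    PySem.List.slice base (some (n - 1 - i)) (some (2 * n - 1 - i)))

-- ===== PRECONDITION & SPEC =====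
def Spec_solution (n : Int) (out : List (List Int)) : Prop := out = solution_alt n
instance (n : Int) (out : List (List Int)) : Decidable (Spec_solution n out) := by unfold Spec_solution; infer_instance

-- ===== CLAIM (what is proved, stated in full; the proofs are below) =====
def Claim_equal_solution : Prop := ∀ (n : Int), Dom_solution n → Spec_solution n (solution n)

-- ===== LEMMAS AND PROOFS =====

-- A's append-accumulator loop is a map.
theorem foldl_append_map {α β : Type} (f : α → β) (l : List α) (init : List β) :
    l.foldl (fun acc x => acc ++ [f x]) init = init ++ l.map f := by
  induction l generalizing init with
  | nil => simp
  | cons x t ih => simp [List.foldl, ih]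

theorem pyRange_cast (n : Int) :
    PySem.List.pyRange 0 n 1 = (List.range n.toNat).map (fun (k : Nat) => (k : Int)) := by
  rw [PySem.List.pyRange_one]
  simp

-- Every entry of B's buffer is the Kronecker delta at position m-1.
theorem base_getElem (m t : Nat) (h : t < 2 * m - 1) :
    (List.replicate (m - 1) (0 : Int) ++ [1] ++ List.replicate (m - 1) 0)[t]'(by simp; omega) =
      if t = m - 1 then 1 else 0 := by
  simp only [List.getElem_append, List.length_append, List.length_replicate, List.length_cons,
    List.length_nil, List.getElem_replicate]
  split_ifs <;> first | rfl | (exfalso; omega) | simp_all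

-- The p-th sliding window of the buffer is the p-th row of the identity matrix.
theorem window_eq_row (m p : Nat) (hp : p < m) :
    (((List.replicate (m - 1) (0 : Int) ++ [1] ++ List.replicate (m - 1) 0).drop
        (m - 1 - p)).take m) =
      (List.range m).map (fun (j : Nat) => if (p : Int) = ((j : Nat) : Int) then (1 : Int) else 0) := by
  apply List.ext_getElem
  · simp; omega
  · intro q h1 h2
    have hq : q < m := by simpa using h2
    rw [List.getElem_take, List.getElem_drop]
    rw [base_getElem m (m - 1 - p + q) (by omega)]
    simp only [List.getElem_map, List.getElem_range]
    by_cases hpq : p = q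
    · subst hpq; simp [show m - 1 - p + p = m - 1 by omega]
    · have h3 : m - 1 - p + q ≠ m - 1 := by omega
      have h4 : ¬ ((p : Int) = (q : Int)) := by exact_mod_cast hpq
      simp [h3, h4]

-- ===== VERDICT (by name: the statement is the Claim_ definition above) =====
theorem solution_spec : Claim_equal_solution := by
  intro n _
  unfold Spec_solution solution solution_alt
  rw [pyRange_cast]
  simp only [foldl_append_map, List.nil_append, List.foldl_map, List.map_map, Function.comp_def]
  apply List.map_congr_left
  intro p hp
  have hpm : p < n.toNat := List.mem_range.mp hp
  have hn : n = (n.toNat : Int) := by omega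
  have h1 : n - 1 - (p : Int) = ((n.toNat - 1 - p : Nat) : Int) := by omega
  have h2 : 2 * n - 1 - (p : Int) =
      ((n.toNat - 1 - p : Nat) : Int) + ((n.toNat : Nat) : Int) := by omega
  have hb : (n - 1).toNat = n.toNat - 1 := by omega
  rw [hb, h1, h2, PySem.List.slice_natCast_add, window_eq_row n.toNat p hpm]
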